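-- pv_equiv track=rewrite | github.com/shaaniitk/doc_poc | modules/chunker.py | group_chunks_by_section
-- ===== SOURCE A (Python) =====
-- def group_chunks_by_section(chunks):
--     """
--     Groups processed chunks by their top-level parent section for organized processing.
--
--     Args:
--         chunks: List of processed chunks with parent_section metadata.
--
--     Returns:
--         dict: Sections as keys, lists of chunks as values.
--     """
--     grouped = {}
--     for chunk in chunks:
--         # Use only the top-level section for grouping to keep it simple
--         top_level_section = chunk['metadata']['hierarchy_path'][0] if chunk['metadata']['hierarchy_path'] else 'Preamble'
--
--         if top_level_section not in grouped:
--             grouped[top_level_section] = []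
--
--         grouped[top_level_section].append(chunk)
--
--     return grouped
-- ===== SOURCE B (Python) =====
-- def group_chunks_by_section(chunks):
--     """Group chunks by top-level hierarchy section: compute all keys in one pass,
--     dedup them in first-occurrence order, then build each group by filtering."""
--     keys = [c['metadata']['hierarchy_path'][0] if c['metadata']['hierarchy_path'] else 'Preamble'
--             for c in chunks]
--     order = list(dict.fromkeys(keys))
--     return {k: [c for c, kk in zip(chunks, keys) if kk == k] for k in order}
-- ===== Notes on version B (the rewrite author's own statement) =====
-- stated objective: alternative
-- what changed: A builds the grouped dict incrementally in one loop with a membership check and in-place append; B precomputes the key list, dedups it in first-occurrence order, and builds each group independently by filtering the (chunk, key) pairs.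
import Mathlib
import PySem

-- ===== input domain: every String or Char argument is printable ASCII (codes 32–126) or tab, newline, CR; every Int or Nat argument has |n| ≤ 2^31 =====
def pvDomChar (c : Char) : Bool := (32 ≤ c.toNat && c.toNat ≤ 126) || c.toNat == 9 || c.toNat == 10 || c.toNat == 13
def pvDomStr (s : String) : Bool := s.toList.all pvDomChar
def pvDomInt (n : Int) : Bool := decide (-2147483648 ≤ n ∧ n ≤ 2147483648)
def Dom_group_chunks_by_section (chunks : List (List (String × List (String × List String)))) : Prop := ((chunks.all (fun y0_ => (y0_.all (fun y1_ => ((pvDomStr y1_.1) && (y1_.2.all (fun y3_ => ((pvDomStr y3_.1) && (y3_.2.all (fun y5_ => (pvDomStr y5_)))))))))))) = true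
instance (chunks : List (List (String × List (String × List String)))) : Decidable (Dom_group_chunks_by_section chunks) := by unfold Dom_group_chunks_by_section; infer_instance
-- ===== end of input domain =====

-- B groups by precomputing each chunk's top-level key, deduping the keys in first-occurrence
-- order and filtering per key, instead of A's incremental dict-building loop (objective: alternative).


-- ===== PORT A =====
-- top_level_section = chunk['metadata']['hierarchy_path'][0] if chunk['metadata']['hierarchy_path'] else 'Preamble'
-- (the same expression appears verbatim in A and in B; exact under Pre_, which guarantees both keys are present)
def pvTopKey (c : List (String × List (String × List String))) : String :=
  let md := ((PySem.Dict.mk c).get? "metadata").getD []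
  let hp := ((PySem.Dict.mk md).get? "hierarchy_path").getD []
  if hp.isEmpty then "Preamble" else hp.headD ""

def group_chunks_by_section (chunks : List (List (String × List (String × List String)))) : List (String × List (List (String × List (String × List String)))) :=
  (chunks.foldl (fun grouped chunk =>
      let k := pvTopKey chunk
      let grouped := if grouped.contains k then grouped else grouped.insert k []
      grouped.modify k [] (fun v => v ++ [chunk]))
    PySem.Dict.empty).items

-- ===== PORT B =====
def group_chunks_by_section_alt (chunks : List (List (String × List (String × List String)))) : List (String × List (List (String × List (String × List String)))) :=
  let keys := chunks.map pvTopKey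
  let order := PySem.List.dedup keys
  order.map (fun k => (k, ((chunks.zip keys).filter (fun p => p.2 == k)).map (fun p => p.1)))

-- ===== PRECONDITION & SPEC =====
-- Pre_: every chunk dict has a 'metadata' key whose value has a 'hierarchy_path' key;
-- otherwise the Python A (and B) raise KeyError.
def Pre_group_chunks_by_section (chunks : List (List (String × List (String × List String)))) : Prop :=
  (chunks.all (fun c =>
    match (PySem.Dict.mk c).get? "metadata" with
    | none => false
    | some md => ((PySem.Dict.mk md).get? "hierarchy_path").isSome)) = true
instance (chunks : List (List (String × List (String × List String)))) : Decidable (Pre_group_chunks_by_section chunks) := by unfold Pre_group_chunks_by_section; infer_instance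
def pvWitness_group_chunks_by_section : (List (List (String × List (String × List String)))) :=
  [[("metadata", [("hierarchy_path", ["Intro", "Sub"])])],
   [("metadata", [("hierarchy_path", [])])],
   [("metadata", [("hierarchy_path", ["Intro"])])]]
def Spec_group_chunks_by_section (chunks : List (List (String × List (String × List String)))) (out : List (String × List (List (String × List (String × List String))))) : Prop := out = group_chunks_by_section_alt chunks
instance (chunks : List (List (String × List (String × List String)))) (out : List (String × List (List (String × List (String × List String))))) : Decidable (Spec_group_chunks_by_section chunks out) := by
  unfold Spec_group_chunks_by_section
  exact @instDecidableEqList _ (@instDecidableEqProd _ _ _ (@instDecidableEqList _ (@instDecidableEqList _ inferInstance))) out _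

-- ===== CLAIM (what is proved, stated in full; the proofs are below) =====
def Claim_equal_group_chunks_by_section : Prop := ∀ (chunks : List (List (String × List (String × List String)))), Dom_group_chunks_by_section chunks → Pre_group_chunks_by_section chunks → Spec_group_chunks_by_section chunks (group_chunks_by_section chunks)

-- ===== LEMMAS AND PROOFS =====

-- A's loop body (insert-if-absent, then append) equals a single Dict.modify, for every accumulator.
theorem pv_step_eq {β : Type} (d : PySem.Dict String (List β)) (k : String) (c : β) :
    (if d.contains k then d else d.insert k []).modify k [] (fun v => v ++ [c])
      = d.modify k [] (fun v => v ++ [c]) := by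
  by_cases h : d.contains k
  · simp [h]
  · simp only [h, Bool.false_eq_true, if_false, PySem.Dict.modify]
    rw [PySem.Dict.getD_insert_self, PySem.Dict.insert_insert_self,
      PySem.Dict.getD_of_not_contains d ([] : List β) (by simpa using h)]

theorem pv_zip_map {α β : Type} (f : α → β) (l : List α) :
    l.zip (l.map f) = l.map (fun c => (c, f c)) := by
  induction l with
  | nil => rfl
  | cons a t ih => simp [ih]

theorem group_chunks_by_section_spec : Claim_equal_group_chunks_by_section := by
  intro chunks _ _
  unfold Spec_group_chunks_by_section group_chunks_by_section group_chunks_by_section_alt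
  -- rewrite A's fold step to a plain modify step
  have hstep : (fun (grouped : PySem.Dict String (List (List (String × List (String × List String))))) chunk =>
      let k := pvTopKey chunk
      let grouped := if grouped.contains k then grouped else grouped.insert k []
      grouped.modify k [] (fun v => v ++ [chunk]))
      = (fun grouped chunk => grouped.modify (pvTopKey chunk) [] (fun v => v ++ [chunk])) := by
    funext d c
    exact pv_step_eq d (pvTopKey c) c
  rw [hstep]
  set D := chunks.foldl (fun grouped chunk => grouped.modify (pvTopKey chunk) [] (fun v => v ++ [chunk])) PySem.Dict.empty with hD
  have hnd : D.keys.Nodup := by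
    rw [hD]
    exact PySem.Dict.nodup_keys_foldl_modify_key chunks pvTopKey [] (fun _ c v => v ++ [c]) PySem.Dict.empty (by simp)
  have hkeys : D.keys = PySem.List.dedup (chunks.map pvTopKey) := by
    rw [hD, PySem.Dict.keys_foldl_modify_key chunks pvTopKey [] (fun _ c v => v ++ [c]) PySem.Dict.empty]
    simp [PySem.Set.update_nil_left, PySem.List.dedup_eq_ofList]
  have hget : ∀ k, D.getD k []
      = ((chunks.zip (chunks.map pvTopKey)).filter (fun p => p.2 == k)).map (fun p => p.1) := by
    intro k
    have hfold : D = (chunks.map (fun c => (pvTopKey c, c))).foldl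
        (fun d p => d.modify p.1 [] (fun v => v ++ [p.2])) PySem.Dict.empty := by
      rw [hD, List.foldl_map]
    rw [hfold, PySem.Dict.getD_foldl_modify_append]
    rw [pv_zip_map pvTopKey chunks]
    simp [PySem.Dict.getD_empty, List.filter_map, List.map_map, Function.comp_def]
  rw [PySem.Dict.items_eq_map_keys D hnd [], hkeys]
  apply List.map_congr_left
  intro k _
  rw [hget k]
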